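-- pv_equiv track=rewrite | github.com/faizanraza/PythonSamples | src/com/fraza/algo/JimSkyscrapersSlow.py | solve
-- ===== SOURCE A (Python) =====
-- def solve(arr):
--     paths = 0
--     for i,h in enumerate(arr):
--         j = i+1
--         while (j < len(arr)):
--             if(arr[j] > h):
--                 break
--             else:
--                 if(arr[j] == h):
--                     paths += 1
--                 j += 1
--     return paths*2
-- ===== SOURCE B (Python) =====
-- def solve(arr):
--     # One-pass monotonic stack: (height, visible-count) pairs; O(n) instead of O(n^2).
--     paths = 0
--     stack = []
--     for x in arr:
--         while stack and stack[-1][0] < x: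
--             stack.pop()
--         if stack and stack[-1][0] == x:
--             c = stack[-1][1]
--             paths += c
--             stack[-1] = (x, c + 1)
--         else:
--             stack.append((x, 1))
--     return paths * 2
-- ===== Notes on version B (the rewrite author's own statement) =====
-- stated objective: faster
-- what changed: Replaced the quadratic nested scan (for each i, walk right until a taller building) by a single left-to-right pass with a monotonic decreasing stack of (height, visible-count) pairs that yields each element's visible equal predecessors in O(1) amortized.
import Mathlib
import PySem

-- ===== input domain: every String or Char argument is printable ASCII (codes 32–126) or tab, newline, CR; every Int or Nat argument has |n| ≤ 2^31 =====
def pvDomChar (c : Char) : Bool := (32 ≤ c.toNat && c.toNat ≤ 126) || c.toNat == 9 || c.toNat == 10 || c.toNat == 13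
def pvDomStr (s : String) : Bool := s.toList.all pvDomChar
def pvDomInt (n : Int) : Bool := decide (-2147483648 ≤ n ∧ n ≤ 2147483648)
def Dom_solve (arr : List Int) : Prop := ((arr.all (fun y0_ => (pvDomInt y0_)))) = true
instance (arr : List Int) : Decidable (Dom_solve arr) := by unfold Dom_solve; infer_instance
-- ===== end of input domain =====

-- B replaces A's nested rightward scans by a single monotonic-stack pass; same return value.

-- ===== PORT A =====
-- inner while loop of A: scan to the right of the building of height h, stop at the first taller one
def innerA (h : Int) : List Int → Int
  | [] => 0
  | x :: xs => if x > h then 0 else (if x = h then 1 else 0) + innerA h xs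

-- outer for loop of A over enumerate(arr): position i with height h scans the tail after it
def outerA : List Int → Int
  | [] => 0
  | h :: rest => innerA h rest + outerA rest

def solve (arr : List Int) : Int := outerA arr * 2

-- ===== PORT B =====
-- B's 'while stack and stack[-1][0] < x: stack.pop()' loop (list head = stack top)
def popSmaller (x : Int) : List (Int × Int) → List (Int × Int)
  | [] => []
  | (h, c) :: st => if h < x then popSmaller x st else (h, c) :: st

-- one iteration of B's for loop on the state (stack, paths)
def stepB (s : List (Int × Int) × Int) (x : Int) : List (Int × Int) × Int :=
  match popSmaller x s.1 with
  | (h, c) :: rest => if h = x then ((x, c + 1) :: rest, s.2 + c) else ((x, 1) :: (h, c) :: rest, s.2)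
  | [] => ([(x, 1)], s.2)

def solve_alt (arr : List Int) : Int := (arr.foldl stepB ([], 0)).2 * 2

-- ===== PRECONDITION & SPEC =====
def Spec_solve (arr : List Int) (out : Int) : Prop := out = solve_alt arr
instance (arr : List Int) (out : Int) : Decidable (Spec_solve arr out) := by unfold Spec_solve; infer_instance

-- ===== CLAIM (what is proved, stated in full; the proofs are below) =====
def Claim_equal_solve : Prop := ∀ (arr : List Int), Dom_solve arr → Spec_solve arr (solve arr)

-- ===== LEMMAS AND PROOFS =====

-- vis p h = number of positions i of p with p[i] = h and every later element of p ≤ h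
-- (exactly the number of new visible-pairs a building of height h appended to p creates)
def vis : List Int → Int → Int
  | [], _ => 0
  | b :: q, h => (if b = h ∧ (∀ y ∈ q, y ≤ h) then 1 else 0) + vis q h

theorem vis_nonneg (p : List Int) (h : Int) : 0 ≤ vis p h := by
  induction p with
  | nil => simp [vis]
  | cons b q ih => simp only [vis]; split_ifs <;> omega

theorem innerA_snoc (h a : Int) (q : List Int) :
    innerA h (q ++ [a]) = innerA h q + (if (∀ y ∈ q, y ≤ h) ∧ a = h then 1 else 0) := by
  induction q with
  | nil =>
    simp only [List.nil_append, innerA, List.not_mem_nil, false_implies, implies_true, true_and]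
    split_ifs <;> omega
  | cons x q ih =>
    simp only [List.cons_append, innerA, ih, List.forall_mem_cons]
    by_cases hx : x > h
    · rw [if_pos hx, if_pos hx, if_neg (by rintro ⟨⟨h1, -⟩, -⟩; omega)]; omega
    · rw [if_neg hx, if_neg hx]
      have hx' : x ≤ h := by omega
      simp only [hx', true_and]
      split_ifs <;> omega

theorem outerA_snoc (p : List Int) (a : Int) :
    outerA (p ++ [a]) = outerA p + vis p a := by
  induction p with
  | nil => simp [outerA, innerA, vis]
  | cons b q ih =>
    simp only [List.cons_append, outerA, ih, innerA_snoc, vis]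
    by_cases hab : a = b
    · subst hab
      split_ifs with h1 h2 h2 <;> try omega
      · exact absurd ⟨rfl, h1.1⟩ h2
      · exact absurd ⟨h2.2, rfl⟩ h1
    · rw [if_neg (by rintro ⟨-, h⟩; exact hab h), if_neg (by rintro ⟨h, -⟩; exact hab h.symm)]
      omega

theorem vis_snoc (p : List Int) (a h : Int) :
    vis (p ++ [a]) h = if a ≤ h then vis p h + (if a = h then 1 else 0) else 0 := by
  induction p with
  | nil =>
    simp only [List.nil_append, vis, List.not_mem_nil, false_implies, implies_true, and_true]
    split_ifs <;> omega
  | cons b q ih =>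
    simp only [List.cons_append, vis, ih, List.forall_mem_append, List.forall_mem_singleton]
    by_cases hah : a ≤ h
    · simp only [hah, and_true]
      split_ifs <;> omega
    · simp only [if_neg hah]
      rw [if_neg (by rintro ⟨-, -, hc⟩; exact hah hc)]
      omega

def StkInv (p : List Int) (st : List (Int × Int)) : Prop :=
  (∀ e ∈ st, e.2 = vis p e.1) ∧
  List.Pairwise (fun a b : Int × Int => a.1 < b.1) st ∧
  (∀ h : Int, vis p h ≠ 0 ↔ ∃ c, (h, c) ∈ st)

theorem popSmaller_subset (x : Int) (st : List (Int × Int)) :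
    ∀ e ∈ popSmaller x st, e ∈ st := by
  induction st with
  | nil => simp [popSmaller]
  | cons a st ih =>
    obtain ⟨h, c⟩ := a
    simp only [popSmaller]
    split_ifs with hlt
    · exact fun e he => List.mem_cons_of_mem _ (ih e he)
    · exact fun e he => he

theorem popSmaller_pairwise (x : Int) (st : List (Int × Int))
    (hp : List.Pairwise (fun a b : Int × Int => a.1 < b.1) st) :
    List.Pairwise (fun a b : Int × Int => a.1 < b.1) (popSmaller x st) := by
  induction st with
  | nil => simp [popSmaller]
  | cons a st ih =>
    obtain ⟨h, c⟩ := a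
    simp only [popSmaller]
    split_ifs with hlt
    · exact ih (List.Pairwise.of_cons hp)
    · exact hp

theorem popSmaller_mem_of_ge (x : Int) (st : List (Int × Int)) (e : Int × Int)
    (he : e ∈ st) (hge : ¬ e.1 < x) : e ∈ popSmaller x st := by
  induction st with
  | nil => simp at he
  | cons a st ih =>
    obtain ⟨h, c⟩ := a
    simp only [popSmaller]
    split_ifs with hlt
    · rcases List.mem_cons.mp he with he1 | he2
      · subst he1; exact absurd hlt hge
      · exact ih he2
    · exact he

theorem popSmaller_nil_all_lt (x : Int) (st : List (Int × Int))
    (hnil : popSmaller x st = []) : ∀ e ∈ st, e.1 < x := by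
  induction st with
  | nil => simp
  | cons a st ih =>
    obtain ⟨h, c⟩ := a
    simp only [popSmaller] at hnil
    split_ifs at hnil with hlt
    intro e he
    rcases List.mem_cons.mp he with he1 | he2
    · subst he1; exact hlt
    · exact ih hnil e he2

theorem popSmaller_head_ge (x h0 c0 : Int) (st rest : List (Int × Int))
    (heq : popSmaller x st = (h0, c0) :: rest) : ¬ h0 < x := by
  induction st with
  | nil => simp [popSmaller] at heq
  | cons a st ih =>
    obtain ⟨h, c⟩ := a
    simp only [popSmaller] at heq
    split_ifs at heq with hlt
    · exact ih heq
    · simp only [List.cons.injEq, Prod.mk.injEq] at heq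
      obtain ⟨⟨rfl, -⟩, -⟩ := heq
      exact hlt

theorem stepB_correct (p : List Int) (st : List (Int × Int)) (c x : Int)
    (hinv : StkInv p st) :
    (stepB (st, c) x).2 = c + vis p x ∧ StkInv (p ++ [x]) (stepB (st, c) x).1 := by
  obtain ⟨hcnt, hpw, hmem⟩ := hinv
  have hpop_sub := popSmaller_subset x st
  have hpop_pw := popSmaller_pairwise x st hpw
  simp only [stepB]
  rcases hres : popSmaller x st with _ | ⟨⟨h0, c0⟩, rest⟩
  · -- stack emptied: nothing at height x was visible before
    have hall := popSmaller_nil_all_lt x st hres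
    have hvx : vis p x = 0 := by
      by_contra hne
      obtain ⟨cc, hcc⟩ := (hmem x).mp hne
      exact absurd (hall _ hcc) (lt_irrefl x)
    refine ⟨by dsimp; omega, ?_, by simp, ?_⟩
    · intro e he
      simp only [List.mem_singleton] at he
      subst he
      simp [vis_snoc, hvx]
    · intro h
      rw [vis_snoc]
      by_cases hxh : x = h
      · subst hxh
        simp [hvx]
      · constructor
        · intro hne
          by_cases hle : x ≤ h
          · rw [if_pos hle, if_neg hxh] at hne
            obtain ⟨cc, hcc⟩ := (hmem h).mp (by omega)
            have := hall _ hcc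
            simp only at this
            omega
          · rw [if_neg hle] at hne; omega
        · rintro ⟨cc, hcc⟩
          simp only [List.mem_singleton, Prod.mk.injEq] at hcc
          exact absurd hcc.1.symm hxh
  · have hh0 := popSmaller_head_ge x h0 c0 st rest hres
    have hmem_pop : ∀ e ∈ (h0, c0) :: rest, e ∈ st := hres ▸ hpop_sub
    have hpw_pop : List.Pairwise (fun a b : Int × Int => a.1 < b.1) ((h0, c0) :: rest) :=
      hres ▸ hpop_pw
    have hrest_gt : ∀ e ∈ rest, h0 < e.1 := fun e he => (List.pairwise_cons.mp hpw_pop).1 e he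
    have hsurv : ∀ h : Int, ¬ h < x →
        ((∃ cc, (h, cc) ∈ st) ↔ ∃ cc, (h, cc) ∈ (h0, c0) :: rest) := by
      intro h hge
      constructor
      · rintro ⟨cc, hcc⟩
        exact ⟨cc, hres ▸ popSmaller_mem_of_ge x st (h, cc) hcc hge⟩
      · rintro ⟨cc, hcc⟩
        exact ⟨cc, hmem_pop _ hcc⟩
    dsimp only
    split_ifs with hhx
    · -- top equals x: bump its count, add it to paths
      subst hhx
      have hc0 : c0 = vis p h0 := hcnt _ (hmem_pop _ (List.mem_cons_self ..))
      refine ⟨by dsimp; omega, ?_, ?_, ?_⟩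
      · intro e he
        rcases List.mem_cons.mp he with he1 | he2
        · subst he1; simp [vis_snoc, ← hc0]
        · have hgt := hrest_gt e he2
          have := hcnt e (hmem_pop _ (List.mem_cons_of_mem _ he2))
          rw [vis_snoc, if_pos (by omega), if_neg (by omega)]
          omega
      · exact List.pairwise_cons.mpr ⟨hrest_gt, List.Pairwise.of_cons hpw_pop⟩
      · intro h
        rw [vis_snoc]
        have hvnn := vis_nonneg p h
        by_cases hxh : h = h0
        · subst hxh
          rw [if_pos (le_refl h), if_pos rfl]
          exact ⟨fun _ => ⟨c0 + 1, List.mem_cons_self ..⟩, fun _ => by omega⟩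
        · constructor
          · intro hne
            by_cases hle : h0 ≤ h
            · rw [if_pos hle, if_neg (fun hh => hxh hh.symm)] at hne
              obtain ⟨cc, hcc⟩ := (hsurv h (by omega)).mp ((hmem h).mp (by omega))
              rcases List.mem_cons.mp hcc with h1 | h2
              · simp only [Prod.mk.injEq] at h1
                exact absurd h1.1 hxh
              · exact ⟨cc, List.mem_cons_of_mem _ h2⟩
            · rw [if_neg (by omega)] at hne; omega
          · rintro ⟨cc, hcc⟩
            rcases List.mem_cons.mp hcc with h1 | h2
            · simp only [Prod.mk.injEq] at h1
              exact absurd h1.1 hxh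
            · have hgt := hrest_gt _ h2
              have hv : vis p h ≠ 0 :=
                (hmem h).mpr ⟨cc, hmem_pop _ (List.mem_cons_of_mem _ h2)⟩
              rw [if_pos (by omega), if_neg (by omega)]
              omega
    · -- top strictly taller: height x was not visible before, push a fresh entry
      have hx0 : vis p x = 0 := by
        by_contra hne
        obtain ⟨cc, hcc⟩ := (hsurv x (lt_irrefl x)).mp ((hmem x).mp hne)
        rcases List.mem_cons.mp hcc with h1 | h2
        · simp only [Prod.mk.injEq] at h1
          exact hhx h1.1.symm
        · have := hrest_gt _ h2
          simp only at this
          omega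
      have hh0x : x < h0 := by omega
      refine ⟨by dsimp; omega, ?_, ?_, ?_⟩
      · intro e he
        rcases List.mem_cons.mp he with he1 | he2
        · subst he1; simp [vis_snoc, hx0]
        · have hge : x < e.1 := by
            rcases List.mem_cons.mp he2 with h1 | h2
            · rw [h1]; exact hh0x
            · have := hrest_gt _ h2; omega
          have := hcnt e (hmem_pop _ he2)
          rw [vis_snoc, if_pos (by omega), if_neg (by omega)]
          omega
      · refine List.pairwise_cons.mpr ⟨?_, hpw_pop⟩
        intro e he
        rcases List.mem_cons.mp he with h1 | h2
        · rw [h1]; exact hh0x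
        · have := hrest_gt _ h2; omega
      · intro h
        rw [vis_snoc]
        have hvnn := vis_nonneg p h
        by_cases hxh : h = x
        · subst hxh
          rw [if_pos (le_refl h), if_pos rfl]
          exact ⟨fun _ => ⟨1, List.mem_cons_self ..⟩, fun _ => by omega⟩
        · constructor
          · intro hne
            by_cases hle : x ≤ h
            · rw [if_pos hle, if_neg (fun hh => hxh hh.symm)] at hne
              obtain ⟨cc, hcc⟩ := (hsurv h (by omega)).mp ((hmem h).mp (by omega))
              exact ⟨cc, List.mem_cons_of_mem _ hcc⟩
            · rw [if_neg hle] at hne; omega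
          · rintro ⟨cc, hcc⟩
            rcases List.mem_cons.mp hcc with h1 | h2
            · simp only [Prod.mk.injEq] at h1
              exact absurd h1.1 hxh
            · have hge : x < h := by
                rcases List.mem_cons.mp h2 with g1 | g2
                · simp only [Prod.mk.injEq] at g1
                  omega
                · have := hrest_gt _ g2; omega
              have hv : vis p h ≠ 0 := (hmem h).mpr ⟨cc, hmem_pop _ h2⟩
              rw [if_pos (by omega), if_neg (by omega)]
              omega

theorem foldl_stepB (l : List Int) : ∀ (p : List Int) (st : List (Int × Int)) (c : Int),
    StkInv p st → c = outerA p → (l.foldl stepB (st, c)).2 = outerA (p ++ l) := by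
  induction l with
  | nil => intro p st c _ hc; simpa using hc
  | cons x l ih =>
    intro p st c hinv hc
    obtain ⟨hpaths, hinv'⟩ := stepB_correct p st c x hinv
    simp only [List.foldl_cons]
    rw [show stepB (st, c) x = ((stepB (st, c) x).1, (stepB (st, c) x).2) from rfl]
    have := ih (p ++ [x]) (stepB (st, c) x).1 (stepB (st, c) x).2 hinv'
      (by rw [hpaths, hc, outerA_snoc])
    simpa using this

theorem StkInv_nil : StkInv [] [] := by
  refine ⟨by simp, by simp, ?_⟩
  intro h; simp [vis]

-- ===== VERDICT (by name: the statement is the Claim_ definition above) =====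
theorem solve_spec : Claim_equal_solve := by
  intro arr _
  unfold Spec_solve solve solve_alt
  rw [foldl_stepB arr [] [] 0 StkInv_nil (by simp [outerA])]
  simp
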